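-- pv_equiv track=rewrite | github.com/Yutiks/MyDb | select_column.py | split_by_and
-- ===== SOURCE A (Python) =====
-- def split_by_and(where_part):
--     parts = []
--     section = []
--     words = where_part.split()
--     inside_between = False
--     for i, word in enumerate(words):
--         if word == "BETWEEN":
--             inside_between = True
--         if word == "AND" and not inside_between:
--             parts.append(" ".join(section))
--             section = []
--         else:
--             section.append(word)
--         if inside_between and word == "AND":
--             inside_between = False
--     if section:
--         parts.append(" ".join(section))
--     return [part.strip() for part in parts]
-- ===== SOURCE B (Python) =====
-- def split_by_and(where_part):
--     words = where_part.split()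
--     # pass 1: indices where AND acts as a top-level separator
--     seps = []
--     inside_between = False
--     for i, word in enumerate(words):
--         if word == "BETWEEN":
--             inside_between = True
--         elif word == "AND":
--             if not inside_between:
--                 seps.append(i)
--             inside_between = False
--     # pass 2: cut the word list at the separator indices
--     parts = []
--     start = 0
--     for s in seps:
--         parts.append(" ".join(words[start:s]).strip())
--         start = s + 1
--     tail = words[start:]
--     if tail:
--         parts.append(" ".join(tail).strip())
--     return parts
-- ===== Notes on version B (the rewrite author's own statement) =====
-- stated objective: alternative
-- what changed: Replaces A's single-pass accumulator state machine (growing a current section and flushing it at each top-level AND) by two passes: one pass collects the indices where AND is a top-level separator, a second pass cuts the word list into slices at exactly those indices.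
import Mathlib
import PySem

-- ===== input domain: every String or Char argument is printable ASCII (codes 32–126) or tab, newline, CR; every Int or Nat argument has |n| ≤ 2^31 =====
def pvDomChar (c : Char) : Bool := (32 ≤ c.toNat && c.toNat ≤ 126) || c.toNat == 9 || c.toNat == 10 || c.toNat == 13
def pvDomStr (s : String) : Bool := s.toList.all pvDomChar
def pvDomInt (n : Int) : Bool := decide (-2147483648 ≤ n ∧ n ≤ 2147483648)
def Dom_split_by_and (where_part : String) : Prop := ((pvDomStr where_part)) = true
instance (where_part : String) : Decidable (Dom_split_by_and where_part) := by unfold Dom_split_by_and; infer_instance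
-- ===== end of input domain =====

-- B rebuilds the split in two passes (separator indices, then cutting the word
-- list at them) instead of A's single accumulator state machine; objective: alternative.

-- ===== PORT A =====
-- state = (parts, section, inside_between)
def pvStepA (st : List String × List String × Bool) (word : String) :
    List String × List String × Bool :=
  let inside := if word == "BETWEEN" then true else st.2.2
  let ps :=
    if word == "AND" && !inside then (st.1 ++ [PySem.Str.join " " st.2.1], ([] : List String))
    else (st.1, st.2.1 ++ [word])
  let inside := if inside && word == "AND" then false else inside
  (ps.1, ps.2, inside)

def split_by_and (where_part : String) : List String :=
  let words := PySem.Str.split₀ where_part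
  let st := words.foldl pvStepA ([], [], false)
  let parts := if st.2.1 ≠ [] then st.1 ++ [PySem.Str.join " " st.2.1] else st.1
  parts.map PySem.Str.strip

-- ===== PORT B =====
-- pass 1 state = (separator indices, inside_between)
def pvStep1 (st : List Int × Bool) (iw : Int × String) : List Int × Bool :=
  if iw.2 == "BETWEEN" then (st.1, true)
  else if iw.2 == "AND" then (if !st.2 then (st.1 ++ [iw.1], false) else (st.1, false))
  else st

-- pass 2 state = (parts, start)
def pvStep2 (words : List String) (st : List String × Int) (s : Int) : List String × Int :=
  (st.1 ++ [PySem.Str.strip (PySem.Str.join " " (PySem.List.slice words (some st.2) (some s)))],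
   s + 1)

def split_by_and_alt (where_part : String) : List String :=
  let words := PySem.Str.split₀ where_part
  let p1 := (PySem.List.enumerate words 0).foldl pvStep1 ([], false)
  let st2 := p1.1.foldl (pvStep2 words) ([], 0)
  let tail := PySem.List.slice words (some st2.2) none
  if tail ≠ [] then st2.1 ++ [PySem.Str.strip (PySem.Str.join " " tail)] else st2.1

-- ===== PRECONDITION & SPEC =====
def Spec_split_by_and (where_part : String) (out : List String) : Prop := out = split_by_and_alt where_part
instance (where_part : String) (out : List String) : Decidable (Spec_split_by_and where_part out) := by unfold Spec_split_by_and; infer_instance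

-- ===== CLAIM (what is proved, stated in full; the proofs are below) =====
def Claim_equal_split_by_and : Prop := ∀ (where_part : String), Dom_split_by_and where_part → Spec_split_by_and where_part (split_by_and where_part)

-- ===== LEMMAS AND PROOFS =====

-- the common recursive characterisation of both programs
def pvCuts : List String → List String → Bool → List String
  | [], sec, _ => if sec = [] then [] else [PySem.Str.strip (PySem.Str.join " " sec)]
  | w :: ws, sec, inside =>
    if w = "BETWEEN" then pvCuts ws (sec ++ [w]) true
    else if w = "AND" then
      (if inside then pvCuts ws (sec ++ [w]) false
       else PySem.Str.strip (PySem.Str.join " " sec) :: pvCuts ws [] false)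
    else pvCuts ws (sec ++ [w]) inside

def pvFinA (st : List String × List String × Bool) : List String :=
  (if st.2.1 ≠ [] then st.1 ++ [PySem.Str.join " " st.2.1] else st.1).map PySem.Str.strip

lemma lemA : ∀ (ws parts sec : List String) (inside : Bool),
    pvFinA (ws.foldl pvStepA (parts, sec, inside))
      = parts.map PySem.Str.strip ++ pvCuts ws sec inside := by
  intro ws
  induction ws with
  | nil =>
    intro parts sec inside
    by_cases h : sec = [] <;> simp [pvFinA, pvCuts, h]
  | cons w ws ih =>
    intro parts sec inside
    by_cases hb : w = "BETWEEN"
    · subst hb; simp [pvStepA, pvCuts, ih]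
    · by_cases ha : w = "AND"
      · subst ha
        by_cases hi : inside = true
        · simp [pvStepA, pvCuts, hi, ih]
        · simp at hi
          simp [pvStepA, pvCuts, hi, ih]
      · simp [pvStepA, pvCuts, hb, ha, ih]

def pvSeps (l : List (Int × String)) (inside : Bool) : List Int :=
  (l.foldl pvStep1 ([], inside)).1

lemma pass1_acc : ∀ (l : List (Int × String)) (acc : List Int) (inside : Bool),
    l.foldl pvStep1 (acc, inside) = (acc ++ pvSeps l inside, (l.foldl pvStep1 ([], inside)).2) := by
  intro l
  induction l with
  | nil => intro acc inside; simp [pvSeps]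
  | cons p l ih =>
    intro acc inside
    by_cases hb : p.2 = "BETWEEN"
    · have e : ∀ a : List Int, pvStep1 (a, inside) p = (a, true) := by
        intro a; simp [pvStep1, hb]
      have hs : pvSeps (p :: l) inside = pvSeps l true := by
        unfold pvSeps; rw [List.foldl_cons, e]
      have h2 : ((p :: l).foldl pvStep1 ([], inside)).2 = (l.foldl pvStep1 ([], true)).2 := by
        rw [List.foldl_cons, e]
      rw [List.foldl_cons, e, ih, hs, h2]
    · by_cases ha : p.2 = "AND"
      · by_cases hi : inside = true
        · have e : ∀ a : List Int, pvStep1 (a, inside) p = (a, false) := by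
            intro a; simp [pvStep1, ha, hi]
          have hs : pvSeps (p :: l) inside = pvSeps l false := by
            unfold pvSeps; rw [List.foldl_cons, e]
          have h2 : ((p :: l).foldl pvStep1 ([], inside)).2 = (l.foldl pvStep1 ([], false)).2 := by
            rw [List.foldl_cons, e]
          rw [List.foldl_cons, e, ih, hs, h2]
        · simp only [Bool.not_eq_true] at hi
          have e : ∀ a : List Int, pvStep1 (a, inside) p = (a ++ [p.1], false) := by
            intro a; simp [pvStep1, ha, hi]
          have hs : pvSeps (p :: l) inside = p.1 :: pvSeps l false := by
            unfold pvSeps; rw [List.foldl_cons, e, ih]; simp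
            rfl
          have h2 : ((p :: l).foldl pvStep1 ([], inside)).2 = (l.foldl pvStep1 ([], false)).2 := by
            rw [List.foldl_cons, e, ih, ih]
          rw [List.foldl_cons, e, ih, hs, h2]
          simp
      · have e : ∀ a : List Int, pvStep1 (a, inside) p = (a, inside) := by
          intro a; simp [pvStep1, hb, ha]
        have hs : pvSeps (p :: l) inside = pvSeps l inside := by
          unfold pvSeps; rw [List.foldl_cons, e]
        have h2 : ((p :: l).foldl pvStep1 ([], inside)).2 = (l.foldl pvStep1 ([], inside)).2 := by
          rw [List.foldl_cons, e]
        rw [List.foldl_cons, e, ih, hs, h2]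

lemma pvSeps_cons (i : Int) (w : String) (l : List (Int × String)) (inside : Bool) :
    pvSeps ((i, w) :: l) inside =
      if w = "BETWEEN" then pvSeps l true
      else if w = "AND" then (if inside then pvSeps l false else i :: pvSeps l false)
      else pvSeps l inside := by
  have key : ∀ (st : List Int × Bool), (List.foldl pvStep1 st l).1 = st.1 ++ pvSeps l st.2 := by
    rintro ⟨a, b⟩; rw [pass1_acc]
  show (List.foldl pvStep1 (pvStep1 ([], inside) (i, w)) l).1 = _
  rw [key]
  by_cases hb : w = "BETWEEN"
  · simp [pvStep1, hb]
  · by_cases ha : w = "AND"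
    · cases inside <;> simp [pvStep1, ha]
    · simp [pvStep1, hb, ha]

def pvFinB (words : List String) (parts : List String) (start : Int) (seps : List Int) :
    List String :=
  let st2 := seps.foldl (pvStep2 words) (parts, start)
  let tail := PySem.List.slice words (some st2.2) none
  if tail ≠ [] then st2.1 ++ [PySem.Str.strip (PySem.Str.join " " tail)] else st2.1

lemma pvFinB_cons (words parts : List String) (start s : Int) (seps : List Int) :
    pvFinB words parts start (s :: seps) =
      pvFinB words
        (parts ++ [PySem.Str.strip (PySem.Str.join " " (PySem.List.slice words (some start) (some s)))])
        (s + 1) seps := rfl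

lemma lemB : ∀ (words ws : List String) (k start : Nat) (inside : Bool) (parts : List String),
    start ≤ k → words.drop k = ws →
    pvFinB words parts (start : Int) (pvSeps (PySem.List.enumerate ws (k : Int)) inside)
      = parts ++ pvCuts ws ((words.drop start).take (k - start)) inside := by
  intro words ws
  induction ws generalizing words with
  | nil =>
    intro k start inside parts hsk hdrop
    have hlen : words.length ≤ k := List.drop_eq_nil_iff.mp hdrop
    have hsec : (words.drop start).take (k - start) = words.drop start := by
      apply List.take_of_length_le; simp; omega
    show pvFinB words parts (start : Int) (pvSeps [] inside) = _
    unfold pvFinB pvSeps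
    simp only [List.foldl_nil]
    rw [PySem.List.slice_from_natCast, hsec]
    by_cases h : words.drop start = [] <;> simp [pvCuts, h]
  | cons w ws ih =>
    intro k start inside parts hsk hdrop
    have hk : k < words.length := by
      by_contra h
      push Not at h
      rw [List.drop_eq_nil_of_le h] at hdrop
      cases hdrop
    have hw : words[k]? = some w := by
      have h0 : (words.drop k)[0]? = some w := by rw [hdrop]; rfl
      rw [List.getElem?_drop] at h0
      simpa using h0
    have hdrop' : words.drop (k + 1) = ws := by
      have ht : (words.drop k).tail = words.drop (k + 1) := List.tail_drop
      rw [hdrop] at ht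
      exact ht.symm
    have hsec : (words.drop start).take (k - start) ++ [w]
        = (words.drop start).take (k + 1 - start) := by
      have h1 : k + 1 - start = (k - start) + 1 := by omega
      rw [h1, List.take_add_one]
      congr 1
      have h2 : (words.drop start)[k - start]? = words[k]? := by
        rw [List.getElem?_drop]
        congr 1
        omega
      rw [h2, hw]
      rfl
    have henum : PySem.List.enumerate (w :: ws) (k : Int)
        = ((k : Int), w) :: PySem.List.enumerate ws (((k + 1 : Nat) : Int)) := by
      rw [PySem.List.enumerate_cons]
      push_cast
      ring_nf
    rw [henum, pvSeps_cons]
    by_cases hb : w = "BETWEEN"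
    · rw [if_pos hb, ih words (k + 1) start true parts (by omega) hdrop']
      have hc : pvCuts (w :: ws) ((words.drop start).take (k - start)) inside
          = pvCuts ws ((words.drop start).take (k + 1 - start)) true := by
        rw [pvCuts, if_pos hb, hsec]
      rw [hc]
    · rw [if_neg hb]
      by_cases ha : w = "AND"
      · rw [if_pos ha]
        cases inside with
        | true =>
          rw [if_pos rfl, ih words (k + 1) start false parts (by omega) hdrop']
          have hc : pvCuts (w :: ws) ((words.drop start).take (k - start)) true
              = pvCuts ws ((words.drop start).take (k + 1 - start)) false := by
            rw [pvCuts, if_neg hb, if_pos ha, if_pos rfl, hsec]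
          rw [hc]
        | false =>
          rw [if_neg (by simp), pvFinB_cons, PySem.List.slice_natCast]
          have hcast : ((k : Int)) + 1 = (((k + 1 : Nat)) : Int) := by push_cast; ring
          rw [hcast,
            ih words (k + 1) (k + 1) false
              (parts ++ [PySem.Str.strip (PySem.Str.join " " ((words.drop start).take (k - start)))])
              (le_refl _) hdrop']
          have hc : pvCuts (w :: ws) ((words.drop start).take (k - start)) false
              = PySem.Str.strip (PySem.Str.join " " ((words.drop start).take (k - start)))
                  :: pvCuts ws [] false := by
            rw [pvCuts, if_neg hb, if_pos ha, if_neg (by simp)]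
          rw [hc, Nat.sub_self]
          simp
      · rw [if_neg ha, ih words (k + 1) start inside parts (by omega) hdrop']
        have hc : pvCuts (w :: ws) ((words.drop start).take (k - start)) inside
            = pvCuts ws ((words.drop start).take (k + 1 - start)) inside := by
          rw [pvCuts, if_neg hb, if_neg ha, hsec]
        rw [hc]

-- ===== VERDICT (by name: the statement is the Claim_ definition above) =====
theorem split_by_and_spec : Claim_equal_split_by_and := by
  intro where_part _
  unfold Spec_split_by_and split_by_and split_by_and_alt
  have hA := lemA (PySem.Str.split₀ where_part) [] [] false
  have hB := lemB (PySem.Str.split₀ where_part) (PySem.Str.split₀ where_part) 0 0 false []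
    (le_refl 0) (by simp)
  simp [pvFinA] at hA
  simp [pvSeps, pvFinB] at hB ⊢
  rw [hA, hB]
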